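-- pv_equiv track=rewrite | github.com/jchxu/Format_Data_v2 | OperateFunc.py | CalcShip
-- ===== SOURCE A (Python) =====
-- def CalcShip(GoodDataDict, SteelCompany):
--     GoodOwner = []
--     GoodShip = {}
--     GoodSteelShip = {}
--     GoodOtherShip = {}
--     for item in GoodDataDict.keys():
--         GoodOwner.append(item.split('-')[1])
--     GoodOwner = list(set(GoodOwner))    #非重复的货主列表
--     for item in GoodOwner:
--         GoodShip[item] = 0
--         if item in SteelCompany:
--             GoodSteelShip[item] = 0
--         else:
--             GoodOtherShip[item] = 0
--     for item in GoodDataDict.keys():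
--         Owner = item.split('-')[1]
--         GoodShip[Owner] += GoodDataDict[item]
--         if Owner in SteelCompany:
--             GoodSteelShip[Owner] += GoodDataDict[item]
--         else:
--             GoodOtherShip[Owner] += GoodDataDict[item]
--     return (GoodShip,GoodSteelShip,GoodOtherShip)
-- ===== SOURCE B (Python) =====
-- def CalcShip(GoodDataDict, SteelCompany):
--     # B: aggregate once, then PARTITION the aggregated totals by steel membership.
--     totals = {}
--     for key, value in GoodDataDict.items():
--         owner = key.split('-')[1]
--         totals[owner] = totals.get(owner, 0) + value
--     steel = {o: v for o, v in totals.items() if o in SteelCompany}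
--     other = {o: v for o, v in totals.items() if o not in SteelCompany}
--     return (totals, steel, other)
-- ===== Notes on version B (the rewrite author's own statement) =====
-- stated objective: simpler
-- what changed: A makes four passes (collect owners, dedupe via set, zero-initialise three dicts, then accumulate into all three in parallel); B aggregates a single totals dict in one scan and then derives the steel/other dicts by partitioning the finished totals, never accumulating into them.
import Mathlib
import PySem

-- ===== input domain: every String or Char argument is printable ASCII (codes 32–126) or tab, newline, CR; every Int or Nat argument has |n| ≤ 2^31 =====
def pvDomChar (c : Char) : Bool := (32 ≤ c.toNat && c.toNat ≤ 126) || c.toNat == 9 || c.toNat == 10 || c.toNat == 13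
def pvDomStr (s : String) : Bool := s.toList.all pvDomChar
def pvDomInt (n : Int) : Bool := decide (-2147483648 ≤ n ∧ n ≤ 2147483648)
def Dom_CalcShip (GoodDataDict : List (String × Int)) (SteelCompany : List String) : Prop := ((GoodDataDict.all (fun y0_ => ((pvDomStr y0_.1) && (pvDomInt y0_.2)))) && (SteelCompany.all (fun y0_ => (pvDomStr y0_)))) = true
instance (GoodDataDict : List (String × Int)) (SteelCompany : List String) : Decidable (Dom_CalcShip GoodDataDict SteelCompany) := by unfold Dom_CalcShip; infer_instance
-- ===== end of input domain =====

set_option maxHeartbeats 800000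


-- B replaces A's four-pass structure (collect owners, dedupe via set, zero-initialise three dicts,
-- accumulate into all three in parallel) with one aggregation into a single totals dict followed by
-- partitioning the finished totals by steel membership; objective: simpler (return value only).

-- item.split('-')[1]; split? is some since sep = "-" ≠ ""; pyGet? none = IndexError (key without '-'), excluded by Pre_
def pvOwner (s : String) : String := (PySem.List.pyGet? ((PySem.Str.split? s "-").getD []) 1).getD ""

-- ===== PORT A =====
def CalcShip (GoodDataDict : List (String × Int)) (SteelCompany : List String) : (List (String × Int)) × (List (String × Int)) × (List (String × Int)) :=
  -- for item in keys: GoodOwner.append(item.split('-')[1])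
  let GoodOwner : List String := GoodDataDict.foldl (fun acc p => acc ++ [pvOwner p.1]) []
  -- GoodOwner = list(set(GoodOwner))
  let GoodOwnerSet : List String := PySem.Set.ofList GoodOwner
  -- zero-initialisation loop over the deduped owners
  let init :=
    GoodOwnerSet.foldl
      (fun (st : PySem.Dict String Int × PySem.Dict String Int × PySem.Dict String Int) item =>
        if SteelCompany.contains item then (st.1.insert item 0, st.2.1.insert item 0, st.2.2)
        else (st.1.insert item 0, st.2.1, st.2.2.insert item 0))
      (PySem.Dict.empty, PySem.Dict.empty, PySem.Dict.empty)
  -- accumulation loop: GoodShip[Owner] += GoodDataDict[item] (dict lookup = first match)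
  let final :=
    GoodDataDict.foldl
      (fun (st : PySem.Dict String Int × PySem.Dict String Int × PySem.Dict String Int) p =>
        if SteelCompany.contains (pvOwner p.1) then
          (st.1.modify (pvOwner p.1) 0 (· + (PySem.Dict.mk GoodDataDict).getD p.1 0),
           st.2.1.modify (pvOwner p.1) 0 (· + (PySem.Dict.mk GoodDataDict).getD p.1 0),
           st.2.2)
        else
          (st.1.modify (pvOwner p.1) 0 (· + (PySem.Dict.mk GoodDataDict).getD p.1 0),
           st.2.1,
           st.2.2.modify (pvOwner p.1) 0 (· + (PySem.Dict.mk GoodDataDict).getD p.1 0)))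
      init
  (final.1.items, final.2.1.items, final.2.2.items)

-- ===== PORT B =====
def CalcShip_alt (GoodDataDict : List (String × Int)) (SteelCompany : List String) : (List (String × Int)) × (List (String × Int)) × (List (String × Int)) :=
  -- totals[owner] = totals.get(owner, 0) + value, one scan over items()
  let totals :=
    GoodDataDict.foldl
      (fun (d : PySem.Dict String Int) p =>
        d.insert (pvOwner p.1) (d.getD (pvOwner p.1) 0 + p.2))
      PySem.Dict.empty
  -- steel = {o: v for o, v in totals.items() if o in SteelCompany}  (a dict comprehension = sequential inserts)
  let steel :=
    ((totals.items).filter (fun p => SteelCompany.contains p.1)).foldl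
      (fun (d : PySem.Dict String Int) p => d.insert p.1 p.2) PySem.Dict.empty
  -- other = {o: v for o, v in totals.items() if o not in SteelCompany}
  let other :=
    ((totals.items).filter (fun p => !SteelCompany.contains p.1)).foldl
      (fun (d : PySem.Dict String Int) p => d.insert p.1 p.2) PySem.Dict.empty
  (totals.items, steel.items, other.items)

-- ===== PRECONDITION & SPEC =====
-- Pre_ excludes (i) inputs with a key not containing '-', on which A (and B) raises IndexError at
-- split('-')[1], and (ii) association lists with duplicate keys, which do not represent a Python dict argument.
def Pre_CalcShip (GoodDataDict : List (String × Int)) (SteelCompany : List String) : Prop :=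
  (∀ p ∈ GoodDataDict, 2 ≤ ((PySem.Str.split? p.1 "-").getD []).length) ∧ (GoodDataDict.map (fun p => p.1)).Nodup
instance (GoodDataDict : List (String × Int)) (SteelCompany : List String) : Decidable (Pre_CalcShip GoodDataDict SteelCompany) := by unfold Pre_CalcShip; infer_instance

def pvWitness_CalcShip : (List (String × Int)) × List String :=
  ([("k-acme", 3), ("m-acme", 4), ("j-blue", 5)], ["acme"])

def Spec_CalcShip (GoodDataDict : List (String × Int)) (SteelCompany : List String) (out : (List (String × Int)) × (List (String × Int)) × (List (String × Int))) : Prop := out = CalcShip_alt GoodDataDict SteelCompany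
instance (GoodDataDict : List (String × Int)) (SteelCompany : List String) (out : (List (String × Int)) × (List (String × Int)) × (List (String × Int))) : Decidable (Spec_CalcShip GoodDataDict SteelCompany out) := by unfold Spec_CalcShip; infer_instance

-- ===== CLAIM (what is proved, stated in full; the proofs are below) =====
def Claim_equal_CalcShip : Prop := ∀ (GoodDataDict : List (String × Int)) (SteelCompany : List String), Dom_CalcShip GoodDataDict SteelCompany → Pre_CalcShip GoodDataDict SteelCompany → Spec_CalcShip GoodDataDict SteelCompany (CalcShip GoodDataDict SteelCompany)

-- ===== LEMMAS AND PROOFS =====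

-- A's zero-initialisation loop, split into its three dict components
lemma pvSplitInitA (SteelCompany : List String) (l : List String)
    (s t o : PySem.Dict String Int) :
    l.foldl
      (fun (st : PySem.Dict String Int × PySem.Dict String Int × PySem.Dict String Int) item =>
        if SteelCompany.contains item then (st.1.insert item 0, st.2.1.insert item 0, st.2.2)
        else (st.1.insert item 0, st.2.1, st.2.2.insert item 0)) (s, t, o)
      = (l.foldl (fun d item => d.insert item 0) s,
         (l.filter (fun item => SteelCompany.contains item)).foldl (fun d item => d.insert item 0) t,
         (l.filter (fun item => !SteelCompany.contains item)).foldl (fun d item => d.insert item 0) o) := by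
  induction l generalizing s t o with
  | nil => rfl
  | cons x xs ih =>
    by_cases hc : x ∈ SteelCompany
    · rw [List.foldl_cons, if_pos (show SteelCompany.contains x = true by simp [hc]), ih]
      simp [hc]
    · rw [List.foldl_cons, if_neg (show ¬SteelCompany.contains x = true by simp [hc]), ih]
      simp [hc]

-- A's accumulation loop, split into its three dict components
lemma pvSplitFinalA (GoodDataDict : List (String × Int)) (SteelCompany : List String)
    (l : List (String × Int)) (s t o : PySem.Dict String Int) :
    l.foldl
      (fun (st : PySem.Dict String Int × PySem.Dict String Int × PySem.Dict String Int) p =>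
        if SteelCompany.contains (pvOwner p.1) then
          (st.1.modify (pvOwner p.1) 0 (· + (PySem.Dict.mk GoodDataDict).getD p.1 0),
           st.2.1.modify (pvOwner p.1) 0 (· + (PySem.Dict.mk GoodDataDict).getD p.1 0),
           st.2.2)
        else
          (st.1.modify (pvOwner p.1) 0 (· + (PySem.Dict.mk GoodDataDict).getD p.1 0),
           st.2.1,
           st.2.2.modify (pvOwner p.1) 0 (· + (PySem.Dict.mk GoodDataDict).getD p.1 0))) (s, t, o)
      = (l.foldl (fun d p => d.modify (pvOwner p.1) 0 (· + (PySem.Dict.mk GoodDataDict).getD p.1 0)) s,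
         (l.filter (fun p => SteelCompany.contains (pvOwner p.1))).foldl
           (fun d p => d.modify (pvOwner p.1) 0 (· + (PySem.Dict.mk GoodDataDict).getD p.1 0)) t,
         (l.filter (fun p => !SteelCompany.contains (pvOwner p.1))).foldl
           (fun d p => d.modify (pvOwner p.1) 0 (· + (PySem.Dict.mk GoodDataDict).getD p.1 0)) o) := by
  induction l generalizing s t o with
  | nil => rfl
  | cons x xs ih =>
    by_cases hc : pvOwner x.1 ∈ SteelCompany
    · rw [List.foldl_cons, if_pos (show SteelCompany.contains (pvOwner x.1) = true by simp [hc]), ih]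
      simp [hc]
    · rw [List.foldl_cons, if_neg (show ¬SteelCompany.contains (pvOwner x.1) = true by simp [hc]), ih]
      simp [hc]

-- A's modify-accumulation: final value at k is the initial value plus the sum of the values whose owner is k
lemma pvGetD_modify_sum (l : List (String × Int)) (d : PySem.Dict String Int) (k : String) :
    (l.foldl (fun d p => d.modify (pvOwner p.1) 0 (· + p.2)) d).getD k 0
      = d.getD k 0 + ((l.filter (fun p => pvOwner p.1 == k)).map (fun p => p.2)).sum := by
  induction l generalizing d with
  | nil => simp
  | cons p ps ih =>
    rw [List.foldl_cons, ih, List.filter_cons, PySem.Dict.getD_modify]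
    by_cases h : k = pvOwner p.1
    · simp [h]
      ring
    · simp [h, Ne.symm h]

-- B's insert-accumulation: same characterisation
lemma pvGetD_insert_sum (l : List (String × Int)) (d : PySem.Dict String Int) (k : String) :
    (l.foldl (fun d p => d.insert (pvOwner p.1) (d.getD (pvOwner p.1) 0 + p.2)) d).getD k 0
      = d.getD k 0 + ((l.filter (fun p => pvOwner p.1 == k)).map (fun p => p.2)).sum := by
  induction l generalizing d with
  | nil => simp
  | cons p ps ih =>
    rw [List.foldl_cons, ih, List.filter_cons, PySem.Dict.getD_insert]
    by_cases h : k = pvOwner p.1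
    · simp [h]
      ring
    · simp [h, Ne.symm h]

-- A's zero-initialisation keeps every default-0 lookup at 0
lemma pvGetD_init (xs : List String) (d : PySem.Dict String Int) (k : String)
    (hd : d.getD k 0 = 0) :
    (xs.foldl (fun d item => d.insert item 0) d).getD k 0 = 0 := by
  induction xs generalizing d with
  | nil => exact hd
  | cons x xs ih =>
    rw [List.foldl_cons]
    exact ih _ (by rw [PySem.Dict.getD_insert]; split_ifs <;> simp [hd])

-- updating a set with elements it already has leaves it unchanged
lemma pvUpdate_self (s : PySem.Set String) (xs : List String) (h : ∀ x ∈ xs, x ∈ s) :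
    PySem.Set.update s xs = s := by
  rw [PySem.Set.update_eq_append_filter]
  have hnil : List.filter (fun y => !PySem.Set.contains s y) (PySem.Set.ofList xs) = [] := by
    rw [List.filter_eq_nil_iff]
    intro y hy
    have hys : y ∈ s := h y ((PySem.Set.mem_ofList xs y).mp hy)
    simp [PySem.Set.contains_eq_listContains, hys]
  rw [hnil, List.append_nil]

-- set(filter) = filter(set): dedup-by-first-occurrence commutes with filtering
lemma pvOfList_filter (c : String → Bool) (xs : List String) :
    PySem.Set.ofList (xs.filter c) = List.filter c (PySem.Set.ofList xs) := by
  induction xs using List.reverseRecOn with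
  | nil => rfl
  | append_singleton xs x ih =>
    rw [List.filter_append, PySem.Set.ofList_append_singleton]
    by_cases hc : c x
    · rw [show List.filter c [x] = [x] from by simp [hc],
        PySem.Set.ofList_append_singleton, ih, PySem.Set.add_eq_ite, PySem.Set.add_eq_ite]
      by_cases hm : x ∈ PySem.Set.ofList xs
      · rw [if_pos hm, if_pos (List.mem_filter.mpr ⟨hm, hc⟩)]
      · rw [if_neg hm, if_neg (fun hx => hm (List.mem_filter.mp hx).1), List.filter_append]
        simp [hc]
    · rw [show List.filter c [x] = ([] : List String) from by simp [hc], List.append_nil, ih,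
        PySem.Set.add_eq_ite]
      by_cases hm : x ∈ PySem.Set.ofList xs
      · rw [if_pos hm]
      · rw [if_neg hm, List.filter_append]
        simp [hc]

-- mapping the owner out of an owner-filtered list = filtering the mapped owners
lemma pvMapFilter (c : String → Bool) (l : List (String × Int)) :
    List.map (fun p => pvOwner p.1) (List.filter (fun p => c (pvOwner p.1)) l)
      = List.filter c (List.map (fun p => pvOwner p.1) l) := by
  induction l with
  | nil => rfl
  | cons p ps ih => by_cases h : c (pvOwner p.1) <;> simp [List.filter_cons, h, ih]

-- A-side component: init-then-modify over keys ks = the map of per-owner sums over ks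
lemma pvItemsA (l : List (String × Int)) (ks : List String)
    (hks : ks = PySem.Set.ofList (l.map (fun p => pvOwner p.1))) :
    (l.foldl (fun d p => d.modify (pvOwner p.1) 0 (· + p.2))
        (ks.foldl (fun d item => d.insert item 0) (PySem.Dict.empty : PySem.Dict String Int))).items
      = ks.map (fun k => (k, ((l.filter (fun p => pvOwner p.1 == k)).map (fun p => p.2)).sum)) := by
  subst hks
  have hInitKeys :
      ((PySem.Set.ofList (l.map (fun p => pvOwner p.1))).foldl (fun d item => d.insert item 0)
        (PySem.Dict.empty : PySem.Dict String Int)).keys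
        = PySem.Set.ofList (l.map (fun p => pvOwner p.1)) := by
    have h := PySem.Dict.keys_foldl_insert_key (PySem.Set.ofList (l.map (fun p => pvOwner p.1)))
      (fun x => x) (fun _ _ => (0 : Int)) PySem.Dict.empty
    simpa [PySem.Dict.keys_empty, PySem.Set.update_nil_left, PySem.Set.ofList_ofList] using h
  have hAkeys :
      (l.foldl (fun d p => d.modify (pvOwner p.1) 0 (· + p.2))
        ((PySem.Set.ofList (l.map (fun p => pvOwner p.1))).foldl (fun d item => d.insert item 0)
          (PySem.Dict.empty : PySem.Dict String Int))).keys
        = PySem.Set.ofList (l.map (fun p => pvOwner p.1)) := by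
    have h := PySem.Dict.keys_foldl_modify_key l (fun p => pvOwner p.1) 0
      (fun _ p => (· + p.2))
      ((PySem.Set.ofList (l.map (fun p => pvOwner p.1))).foldl (fun d item => d.insert item 0)
        (PySem.Dict.empty : PySem.Dict String Int))
    rw [hInitKeys] at h
    rw [pvUpdate_self _ _ (fun x hx => (PySem.Set.mem_ofList _ x).mpr hx)] at h
    exact h
  have hAnodup :
      (l.foldl (fun d p => d.modify (pvOwner p.1) 0 (· + p.2))
        ((PySem.Set.ofList (l.map (fun p => pvOwner p.1))).foldl (fun d item => d.insert item 0)
          (PySem.Dict.empty : PySem.Dict String Int))).keys.Nodup := by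
    rw [hAkeys]; exact PySem.Set.nodup_ofList _
  rw [PySem.Dict.items_eq_map_keys _ hAnodup 0, hAkeys]
  refine List.map_congr_left (fun k _hk => ?_)
  show (k, _) = (k, _)
  rw [pvGetD_modify_sum, pvGetD_init _ _ _ (PySem.Dict.getD_empty k 0)]
  rw [zero_add]

-- B's totals: items of the single insert-accumulating scan = the map of per-owner sums over the deduped owners
lemma pvItemsB (l : List (String × Int)) :
    ((l.foldl (fun d p => d.insert (pvOwner p.1) (d.getD (pvOwner p.1) 0 + p.2))
        (PySem.Dict.empty : PySem.Dict String Int))).items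
      = (PySem.Set.ofList (l.map (fun p => pvOwner p.1))).map
          (fun k => (k, ((l.filter (fun p => pvOwner p.1 == k)).map (fun p => p.2)).sum)) := by
  have hBkeys :
      (l.foldl (fun d p => d.insert (pvOwner p.1) (d.getD (pvOwner p.1) 0 + p.2))
        (PySem.Dict.empty : PySem.Dict String Int)).keys
        = PySem.Set.ofList (l.map (fun p => pvOwner p.1)) := by
    have h := PySem.Dict.keys_foldl_insert_key l (fun p => pvOwner p.1)
      (fun d p => d.getD (pvOwner p.1) 0 + p.2) PySem.Dict.empty
    simpa [PySem.Dict.keys_empty, PySem.Set.update_nil_left] using h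
  have hBnodup :
      (l.foldl (fun d p => d.insert (pvOwner p.1) (d.getD (pvOwner p.1) 0 + p.2))
        (PySem.Dict.empty : PySem.Dict String Int)).keys.Nodup := by
    rw [hBkeys]; exact PySem.Set.nodup_ofList _
  rw [PySem.Dict.items_eq_map_keys _ hBnodup 0, hBkeys]
  refine List.map_congr_left (fun k _hk => ?_)
  show (k, _) = (k, _)
  rw [pvGetD_insert_sum, PySem.Dict.getD_empty, zero_add]

-- a dict comprehension over pairs with distinct keys lists exactly those pairs
lemma pvFoldInsertPairs (l : List (String × Int)) (hnd : (l.map (fun p => p.1)).Nodup) :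
    ((l.foldl (fun (d : PySem.Dict String Int) p => d.insert p.1 p.2) PySem.Dict.empty)).items = l := by
  have h := PySem.Dict.items_foldl_insert_fresh (l := l) (k := fun p => p.1) (v := fun p => p.2)
    (d := PySem.Dict.empty) (by intro a _; exact PySem.Dict.contains_empty a.1) hnd
  simpa using h

-- restricting the owner filter: if k is (resp. is not) in steel, filtering by steel membership
-- first does not change the set of entries whose owner is k
lemma pvFilterOwner (g : List (String × Int)) (c : String → Bool) (k : String)
    (hc : c k = true) :
    (g.filter (fun p => c (pvOwner p.1))).filter (fun p => pvOwner p.1 == k)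
      = g.filter (fun p => pvOwner p.1 == k) := by
  induction g with
  | nil => rfl
  | cons p ps ih =>
    by_cases h : pvOwner p.1 = k
    · simp [List.filter_cons, h, hc, ih]
    · by_cases h2 : c (pvOwner p.1) <;> simp [List.filter_cons, h, h2, ih]

theorem CalcShip_spec : Claim_equal_CalcShip := by
  intro g steel _hdom hpre
  obtain ⟨-, hnd⟩ := hpre
  unfold Spec_CalcShip
  have hval : ∀ p ∈ g, (PySem.Dict.mk g).getD p.1 (0 : Int) = p.2 := by
    intro p hp
    exact PySem.Dict.getD_of_mem_items (PySem.Dict.mk g) (by simpa using hp)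
      (by simpa [PySem.Dict.keys_mk] using hnd) 0
  have hcong : ∀ (l' : List (String × Int)), (∀ p ∈ l', p ∈ g) →
      ∀ I : PySem.Dict String Int,
        List.foldl (fun d p => d.modify (pvOwner p.1) 0 (· + (PySem.Dict.mk g).getD p.1 0)) I l'
          = List.foldl (fun d p => d.modify (pvOwner p.1) 0 (· + p.2)) I l' := by
    intro l' hsub I
    exact PySem.List.foldl_congr_mem l' _ _ I (fun acc p hp => by rw [hval p (hsub p hp)])
  -- notation
  set ks := PySem.Set.ofList (g.map (fun p => pvOwner p.1)) with hksdef
  have hks2 :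
      List.filter (fun item => steel.contains item) ks
        = PySem.Set.ofList ((g.filter (fun p => steel.contains (pvOwner p.1))).map (fun p => pvOwner p.1)) := by
    rw [pvMapFilter (fun item => steel.contains item) g, pvOfList_filter]
  have hks3 :
      List.filter (fun item => !steel.contains item) ks
        = PySem.Set.ofList ((g.filter (fun p => !steel.contains (pvOwner p.1))).map (fun p => pvOwner p.1)) := by
    rw [pvMapFilter (fun item => !steel.contains item) g, pvOfList_filter]
  simp only [CalcShip, CalcShip_alt]
  conv_lhs => rw [PySem.List.foldl_append_singleton_eq_map]
  conv_lhs => rw [List.nil_append]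
  conv_lhs => rw [pvSplitInitA]
  conv_lhs => rw [pvSplitFinalA]
  conv_lhs => rw [hcong g (fun _ h => h)]
  conv_lhs => rw [hcong (g.filter (fun p => steel.contains (pvOwner p.1))) (fun p h => List.mem_of_mem_filter h)]
  conv_lhs => rw [hcong (g.filter (fun p => !steel.contains (pvOwner p.1))) (fun p h => List.mem_of_mem_filter h)]
  rw [pvItemsA g ks hksdef,
    pvItemsA (g.filter (fun p => steel.contains (pvOwner p.1))) _ hks2,
    pvItemsA (g.filter (fun p => !steel.contains (pvOwner p.1))) _ hks3]
  -- B side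
  rw [pvItemsB g]
  -- comprehension dicts list the filtered pairs
  have hndks : ks.Nodup := PySem.Set.nodup_ofList _
  have hsub2 : (((ks.map (fun k => (k, ((g.filter (fun p => pvOwner p.1 == k)).map (fun p => p.2)).sum))).filter
      (fun p => steel.contains p.1)).map (fun p => p.1)).Sublist ks := by
    have := (List.filter_sublist (l := ks.map (fun k => (k, ((g.filter (fun p => pvOwner p.1 == k)).map (fun p => p.2)).sum))) (p := fun p => steel.contains p.1)).map (fun p => p.1)
    simpa [List.map_map, Function.comp_def] using this
  have hsub3 : (((ks.map (fun k => (k, ((g.filter (fun p => pvOwner p.1 == k)).map (fun p => p.2)).sum))).filter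
      (fun p => !steel.contains p.1)).map (fun p => p.1)).Sublist ks := by
    have := (List.filter_sublist (l := ks.map (fun k => (k, ((g.filter (fun p => pvOwner p.1 == k)).map (fun p => p.2)).sum))) (p := fun p => !steel.contains p.1)).map (fun p => p.1)
    simpa [List.map_map, Function.comp_def] using this
  rw [pvFoldInsertPairs _ (hsub2.nodup (by simpa using hndks)),
    pvFoldInsertPairs _ (hsub3.nodup (by simpa using hndks))]
  -- push the membership filters through the map
  rw [List.filter_map, List.filter_map]
  simp only [Function.comp_def]
  rw [hks2, hks3]
  simp only [Prod.mk.injEq]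
  refine ⟨rfl, ?_, ?_⟩
  · refine List.map_congr_left (fun k hk => ?_)
    have hck : steel.contains k = true := by
      rcases (PySem.Set.mem_ofList _ k).mp hk with hkm
      rcases List.mem_map.mp hkm with ⟨p, hp, hpk⟩
      rcases List.mem_filter.mp hp with ⟨_, hcp⟩
      rw [← hpk]; exact hcp
    rw [pvFilterOwner g (fun o => steel.contains o) k hck]
  · refine List.map_congr_left (fun k hk => ?_)
    have hck : (!steel.contains k) = true := by
      rcases (PySem.Set.mem_ofList _ k).mp hk with hkm
      rcases List.mem_map.mp hkm with ⟨p, hp, hpk⟩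
      rcases List.mem_filter.mp hp with ⟨_, hcp⟩
      rw [← hpk]; exact hcp
    rw [pvFilterOwner g (fun o => !steel.contains o) k hck]
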